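-- pv_equiv track=rewrite | github.com/matyi2121/Szamhalo | serv.py | DiffMan
-- ===== SOURCE A (Python) =====
-- def DiffMan(val):
--     retVal = []
--     start = '1'
--     init = True
--     for char in val:
--         if char == '0':
--             if start == '1':
--                 first = '0'
--                 second = '1'
--             else:
--                 first = '1'
--                 second = '0'
--                 start = second
--         else:
--             first = start
--             if first == '1':
--                 second = '0'
--                 start = second
--             else:
--                 second = '1'
--                 start = second
--         retVal.append((int(first),int(second)))
--     return retVal
-- ===== SOURCE B (Python) =====
-- def DiffMan(val):
--     # Divide and conquer: enc(s) returns the encoding of s assuming the machine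
--     # starts in state 1, together with the parity of state-toggling (non-'0') chars.
--     # Combine: the right half's encoding under the flipped start state is the
--     # component-wise swapped encoding, so swap its pairs when the left parity is odd.
--     def enc(s):
--         n = len(s)
--         if n == 0:
--             return [], 0
--         if n == 1:
--             c = s[0]
--             if c == '0':
--                 return [(0, 1)], 0
--             return [(1, 0)], 1
--         m = n // 2
--         L, pl = enc(s[:m])
--         R, pr = enc(s[m:])
--         if pl:
--             R = [(b, a) for a, b in R]
--         return L + R, pl ^ pr
--     return enc(val)[0]
-- ===== Notes on version B (the rewrite author's own statement) =====
-- stated objective: alternative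
-- what changed: Replaces the left-to-right branchy state machine by a divide-and-conquer: recursively encode each half assuming start state 1, then combine by swapping the pairs of the right half's encoding when the left half toggles the state an odd number of times.
import Mathlib
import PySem

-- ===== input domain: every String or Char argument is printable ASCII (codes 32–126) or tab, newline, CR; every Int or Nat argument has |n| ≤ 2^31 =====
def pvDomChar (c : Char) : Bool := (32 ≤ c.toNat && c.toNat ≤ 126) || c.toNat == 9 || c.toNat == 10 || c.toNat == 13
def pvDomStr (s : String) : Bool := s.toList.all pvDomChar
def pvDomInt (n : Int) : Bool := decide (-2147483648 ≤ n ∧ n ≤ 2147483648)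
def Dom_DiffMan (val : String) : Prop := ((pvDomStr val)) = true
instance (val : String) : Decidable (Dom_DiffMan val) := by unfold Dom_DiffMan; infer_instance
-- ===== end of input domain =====

-- B replaces A's sequential state machine by a divide-and-conquer (encode halves, swap right half's pairs on odd left toggle parity); alternative decomposition, same result.

-- ===== PORT A =====
-- fused state machine over the characters; state = (retVal, start), start a string "0"/"1"
def DiffMan (val : String) : List (Int × Int) :=
  (val.toList.foldl
    (fun (acc : List (Int × Int) × String) (char : Char) =>
      let retVal := acc.1
      let start := acc.2
      if char = '0' then
        if start = "1" then
          -- first = "0", second = "1", start unchanged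
          (retVal ++ [(((PySem.Int.ofStr? "0").getD 0), ((PySem.Int.ofStr? "1").getD 0))], start)
        else
          -- first = "1", second = "0", start = second
          (retVal ++ [(((PySem.Int.ofStr? "1").getD 0), ((PySem.Int.ofStr? "0").getD 0))], "0")
      else
        -- first = start
        if start = "1" then
          -- second = "0", start = second
          (retVal ++ [(((PySem.Int.ofStr? start).getD 0), ((PySem.Int.ofStr? "0").getD 0))], "0")
        else
          -- second = "1", start = second
          (retVal ++ [(((PySem.Int.ofStr? start).getD 0), ((PySem.Int.ofStr? "1").getD 0))], "1"))
    ([], "1")).1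

-- ===== PORT B =====
-- enc: encoding of the chars assuming start state 1, plus the toggle parity (Source B's enc);
-- fuel = list length is a totality guard only (structural recursion), the 0-fuel branch is unreachable
def pvEnc : Nat → List Char → (List (Int × Int)) × Nat
  | _, [] => ([], 0)
  | _, [c] => if c = '0' then ([((0 : Int), (1 : Int))], 0) else ([((1 : Int), (0 : Int))], 1)
  | Nat.succ f, c1 :: c2 :: rest =>
    let m := (rest.length + 2) / 2
    let L := pvEnc f ((c1 :: c2 :: rest).take m)
    let R := pvEnc f ((c1 :: c2 :: rest).drop m)
    (L.1 ++ (if L.2 ≠ 0 then R.1.map (fun p => (p.2, p.1)) else R.1), L.2 ^^^ R.2)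
  | 0, _ :: _ :: _ => ([], 0)

def DiffMan_alt (val : String) : List (Int × Int) := (pvEnc val.toList.length val.toList).1

-- ===== PRECONDITION & SPEC =====
def Spec_DiffMan (val : String) (out : List (Int × Int)) : Prop := out = DiffMan_alt val
instance (val : String) (out : List (Int × Int)) : Decidable (Spec_DiffMan val out) := by unfold Spec_DiffMan; infer_instance

-- ===== CLAIM (what is proved, stated in full; the proofs are below) =====
def Claim_equal_DiffMan : Prop := ∀ (val : String), Dom_DiffMan val → Spec_DiffMan val (DiffMan val)

-- ===== LEMMAS AND PROOFS =====

-- Reference machine: state bit s (0/1), emits pairs left-to-right.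
def pvGo : List Char → Nat → List (Int × Int)
  | [], _ => []
  | c :: cs, s =>
    (if c = '0' then ((1 - (s : Int), (s : Int))) else (((s : Int), 1 - (s : Int)))) ::
      pvGo cs (if c = '0' then s else s ^^^ 1)

-- toggle parity of a char list
def pvPar (l : List Char) : Nat := l.foldr (fun c p => (if c = '0' then 0 else 1) ^^^ p) 0

lemma pvPar_le (l : List Char) : pvPar l ≤ 1 := by
  induction l with
  | nil => decide
  | cons c cs ih =>
    rcases Nat.le_one_iff_eq_zero_or_eq_one.mp ih with h | h <;>
      by_cases hc : c = '0' <;>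
        simp [pvPar, hc] at h ⊢ <;> simp [h]

lemma pvPar_append (a b : List Char) : pvPar (a ++ b) = pvPar a ^^^ pvPar b := by
  induction a with
  | nil => simp [pvPar]
  | cons c cs ih => simp [pvPar] at *; rw [ih, Nat.xor_assoc]

lemma pvGo_append (a b : List Char) : ∀ s, s ≤ 1 →
    pvGo (a ++ b) s = pvGo a s ++ pvGo b (s ^^^ pvPar a) := by
  induction a with
  | nil => intro s _; simp [pvGo, pvPar]
  | cons c cs ih =>
    intro s hs
    by_cases hc : c = '0' <;>
      simp [pvGo, hc, pvPar, ih _ hs, ih (s ^^^ 1) (by interval_cases s <;> decide),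
        Nat.xor_assoc]

lemma pvGo_flip (l : List Char) : ∀ s, s ≤ 1 →
    pvGo l (s ^^^ 1) = (pvGo l s).map (fun p => (p.2, p.1)) := by
  induction l with
  | nil => intro s _; simp [pvGo]
  | cons c cs ih =>
    intro s hs
    interval_cases s <;> by_cases hc : c = '0' <;>
      simp [pvGo, hc] <;>
      first
        | simpa using ih 0 (by decide)
        | simpa using ih 1 (by decide)

lemma pvEnc_eq_aux (n : Nat) : ∀ (l : List Char), l.length ≤ n →
    pvEnc n l = (pvGo l 1, pvPar l) := by
  induction n with
  | zero =>
    intro l hl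
    rw [List.length_eq_zero_iff.mp (Nat.le_zero.mp hl)]
    simp [pvEnc, pvGo, pvPar]
  | succ n ih =>
    intro l hl
    rcases l with _ | ⟨c1, _ | ⟨c2, rest⟩⟩
    · simp [pvEnc, pvGo, pvPar]
    · by_cases hc : c1 = '0' <;> simp [pvEnc, pvGo, pvPar, hc]
    · have h1 : ((c1 :: c2 :: rest).take ((rest.length + 2) / 2)).length ≤ n := by
        simp only [List.length_take, List.length_cons] at *; omega
      have h2 : ((c1 :: c2 :: rest).drop ((rest.length + 2) / 2)).length ≤ n := by
        simp only [List.length_drop, List.length_cons] at *; omega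
      have hsplit := (List.take_append_drop ((rest.length + 2) / 2) (c1 :: c2 :: rest)).symm
      have hp := pvPar_le ((c1 :: c2 :: rest).take ((rest.length + 2) / 2))
      simp only [pvEnc, ih _ h1, ih _ h2]
      conv_rhs => rw [hsplit]
      rw [pvGo_append _ _ 1 (by decide), pvPar_append]
      rcases Nat.le_one_iff_eq_zero_or_eq_one.mp hp with h | h
      · rw [h]; simp
      · rw [h, pvGo_flip _ 1 (by decide)]; simp

lemma pvEnc_eq (l : List Char) : pvEnc l.length l = (pvGo l 1, pvPar l) :=
  pvEnc_eq_aux l.length l le_rfl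

-- A's fold equals the reference machine (state string "0"/"1" ↦ bit 0/1).
lemma pvFoldA_eq (l : List Char) :
    ∀ (acc : List (Int × Int)) (s : String), (s = "0" ∨ s = "1") →
    (l.foldl
      (fun (acc : List (Int × Int) × String) (char : Char) =>
        let retVal := acc.1
        let start := acc.2
        if char = '0' then
          if start = "1" then
            (retVal ++ [(((PySem.Int.ofStr? "0").getD 0), ((PySem.Int.ofStr? "1").getD 0))], start)
          else
            (retVal ++ [(((PySem.Int.ofStr? "1").getD 0), ((PySem.Int.ofStr? "0").getD 0))], "0")
        else
          if start = "1" then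
            (retVal ++ [(((PySem.Int.ofStr? start).getD 0), ((PySem.Int.ofStr? "0").getD 0))], "0")
          else
            (retVal ++ [(((PySem.Int.ofStr? start).getD 0), ((PySem.Int.ofStr? "1").getD 0))], "1"))
      (acc, s)).1 = acc ++ pvGo l (if s = "1" then 1 else 0) := by
  induction l with
  | nil => intro acc s _; simp [pvGo]
  | cons c cs ih =>
    intro acc s hs
    rcases hs with h | h <;> subst h <;>
      by_cases hc : c = '0' <;>
        simp [hc, pvGo, ih, List.append_assoc] <;> decide

-- ===== VERDICT (by name: the statement is the Claim_ definition above) =====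
theorem DiffMan_spec : Claim_equal_DiffMan := by
  intro val _
  unfold Spec_DiffMan DiffMan DiffMan_alt
  rw [pvFoldA_eq val.toList [] "1" (Or.inr rfl), pvEnc_eq]
  simp
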